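-- pv_equiv track=rewrite | github.com/AlexUnju/TP09-Cadena-de-caracteres | codigos/ejercicio7.py | primera_letra_mayuscula
-- ===== SOURCE A (Python) =====
-- def primera_letra_mayuscula(cadena):
--     palabras = cadena.split()  # Divide la cadena en palabras
--     resultado = []
--     for palabra in palabras:
--         primera_letra = palabra[0].upper()  # Obtiene la primera letra de la palabra y la convierte a mayúscula
--         resultado.append(primera_letra)  # Agrega la primera letra al resultado
--
--     resultado = ''.join(resultado)  # Une todas las letras obtenidas en un solo string
--     return resultado
-- ===== SOURCE B (Python) =====
-- def primera_letra_mayuscula(cadena):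
--     letras = []
--     prev_space = True
--     for ch in cadena:
--         if prev_space and not ch.isspace():
--             letras.append(ch.upper())
--         prev_space = ch.isspace()
--     return ''.join(letras)
-- ===== Notes on version B (the rewrite author's own statement) =====
-- stated objective: alternative
-- what changed: Replaces split()-then-index-each-word with a single character pass that tracks a previous-was-whitespace flag and emits the uppercased character at each word boundary, never materializing the word list.
import Mathlib
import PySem

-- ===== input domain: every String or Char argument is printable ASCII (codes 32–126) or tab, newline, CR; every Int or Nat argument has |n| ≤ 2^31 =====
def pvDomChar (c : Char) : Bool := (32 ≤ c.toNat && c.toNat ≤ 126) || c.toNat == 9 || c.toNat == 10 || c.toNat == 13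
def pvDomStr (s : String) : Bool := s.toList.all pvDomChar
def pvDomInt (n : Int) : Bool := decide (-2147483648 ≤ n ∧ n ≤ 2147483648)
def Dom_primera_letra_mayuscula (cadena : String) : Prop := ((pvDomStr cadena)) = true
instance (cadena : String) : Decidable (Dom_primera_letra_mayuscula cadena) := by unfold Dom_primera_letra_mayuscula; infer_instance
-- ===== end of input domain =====

-- B replaces split()-plus-indexing with one character pass tracking a previous-was-whitespace flag (alternative decomposition, same cost).

-- ===== PORT A =====
def primera_letra_mayuscula (cadena : String) : String :=
  let palabras := PySem.Str.split₀ cadena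
  let resultado : List Char := palabras.foldl (fun acc palabra =>
    match PySem.Str.pyGet? palabra 0 with
    | some primera => acc ++ [PySem.Chars.upperChar primera]   -- palabra[0].upper()
    | none => acc    -- unreachable: split() yields only nonempty words
    ) []
  String.ofList resultado   -- ''.join(resultado)

-- ===== PORT B =====
def primera_letra_mayuscula_alt (cadena : String) : String :=
  let st := cadena.toList.foldl (fun (st : Bool × List Char) ch =>
      (PySem.Chars.isspace ch,
       if st.1 && !PySem.Chars.isspace ch then st.2 ++ [PySem.Chars.upperChar ch] else st.2))
    (true, [])
  String.ofList st.2   -- ''.join(letras)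

-- ===== PRECONDITION & SPEC =====
def Spec_primera_letra_mayuscula (cadena : String) (out : String) : Prop := out = primera_letra_mayuscula_alt cadena
instance (cadena : String) (out : String) : Decidable (Spec_primera_letra_mayuscula cadena out) := by unfold Spec_primera_letra_mayuscula; infer_instance

-- ===== CLAIM (what is proved, stated in full; the proofs are below) =====
def Claim_equal_primera_letra_mayuscula : Prop := ∀ (cadena : String), Dom_primera_letra_mayuscula cadena → Spec_primera_letra_mayuscula cadena (primera_letra_mayuscula cadena)

-- ===== LEMMAS AND PROOFS =====

/-- The first letters (uppercased) of the words of a character stream,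
with `prev` recording whether the previous character was whitespace. -/
def pvFirsts (prev : Bool) : List Char → List Char
  | [] => []
  | c :: cs =>
    if PySem.Chars.isspace c then pvFirsts true cs
    else (if prev then [PySem.Chars.upperChar c] else []) ++ pvFirsts false cs

/-- Uppercased first character of each word in a word list. -/
def pvHeads (ws : List (List Char)) : List Char :=
  ws.flatMap (fun w => (w.take 1).map PySem.Chars.upperChar)

theorem pvHeads_append (a b : List (List Char)) : pvHeads (a ++ b) = pvHeads a ++ pvHeads b := by
  simp [pvHeads]

theorem pv_split_go_heads (cs : List Char) : ∀ (cur : List Char) (acc : List (List Char)),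
    pvHeads (PySem.Chars.split₀.go cs cur acc)
      = pvHeads acc.reverse
        ++ (if cur.isEmpty then pvFirsts true cs
            else (cur.reverse.take 1).map PySem.Chars.upperChar ++ pvFirsts false cs) := by
  induction cs with
  | nil =>
    intro cur acc
    cases cur with
    | nil => simp [PySem.Chars.split₀.go, pvFirsts]
    | cons c cur => simp [PySem.Chars.split₀.go, pvFirsts, pvHeads_append, pvHeads]
  | cons c rest ih =>
    intro cur acc
    by_cases hs : PySem.Chars.isspace c
    · cases cur with
      | nil => simp [PySem.Chars.split₀.go, hs, pvFirsts, ih]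
      | cons d cur =>
        simp only [PySem.Chars.split₀.go, hs, if_true, List.isEmpty_cons, Bool.false_eq_true,
          if_false, ih [] ((d :: cur).reverse :: acc)]
        simp [pvFirsts, hs, pvHeads_append, pvHeads]
    · cases cur with
      | nil =>
        rw [show PySem.Chars.split₀.go (c :: rest) [] acc
              = PySem.Chars.split₀.go rest [c] acc from by simp [PySem.Chars.split₀.go, hs],
           ih [c] acc]
        simp [pvFirsts, hs]
      | cons d cur =>
        rw [show PySem.Chars.split₀.go (c :: rest) (d :: cur) acc
              = PySem.Chars.split₀.go rest (c :: d :: cur) acc from by simp [PySem.Chars.split₀.go, hs],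
           ih (c :: d :: cur) acc]
        have h1 : pvFirsts false (c :: rest) = pvFirsts false rest := by simp [pvFirsts, hs]
        have h2 : ((c :: d :: cur).reverse).take 1 = ((d :: cur).reverse).take 1 := by
          rw [List.reverse_cons, List.take_append_of_le_length (by simp)]
        rw [h2, h1]
        simp

theorem pv_A_chars (cadena : String) :
    (primera_letra_mayuscula cadena).toList = pvFirsts true cadena.toList := by
  show (String.ofList _).toList = _
  simp only [String.toList_ofList]
  have hfold : ∀ (ws : List String) (init : List Char),
      ws.foldl (fun acc palabra =>
        match PySem.Str.pyGet? palabra 0 with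
        | some primera => acc ++ [PySem.Chars.upperChar primera]
        | none => acc) init
      = init ++ pvHeads (ws.map String.toList) := by
    intro ws
    induction ws with
    | nil => intro init; simp [pvHeads]
    | cons w ws ih =>
      intro init
      have hw : (match PySem.Str.pyGet? w 0 with
          | some primera => init ++ [PySem.Chars.upperChar primera]
          | none => init)
          = init ++ (w.toList.take 1).map PySem.Chars.upperChar := by
        cases hwl : w.toList with
        | nil => simp [PySem.Str.pyGet?, PySem.List.pyGet?, PySem.List.pyIdx?, hwl]
        | cons a l => simp [PySem.Str.pyGet?, PySem.List.pyGet?, PySem.List.pyIdx?, hwl]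
      simp only [List.foldl_cons, hw, ih, List.map_cons]
      simp [pvHeads]
  rw [hfold, List.nil_append, PySem.Str.split₀_map_toList]
  have h := pv_split_go_heads cadena.toList [] []
  simp only [List.isEmpty_nil, if_true, List.reverse_nil] at h
  simpa [PySem.Chars.split₀, pvHeads] using h

theorem pv_B_chars (cadena : String) :
    (primera_letra_mayuscula_alt cadena).toList
      = (cadena.toList.foldl (fun (st : Bool × List Char) ch =>
          (PySem.Chars.isspace ch,
           if st.1 && !PySem.Chars.isspace ch then st.2 ++ [PySem.Chars.upperChar ch] else st.2))
          (true, [])).2 := by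
  simp [primera_letra_mayuscula_alt]

theorem pv_B_fold (cs : List Char) : ∀ (prev : Bool) (letras : List Char),
    (cs.foldl (fun (st : Bool × List Char) ch =>
        (PySem.Chars.isspace ch,
         if st.1 && !PySem.Chars.isspace ch then st.2 ++ [PySem.Chars.upperChar ch] else st.2))
      (prev, letras)).2 = letras ++ pvFirsts prev cs := by
  induction cs with
  | nil => intro prev letras; simp [pvFirsts]
  | cons c rest ih =>
    intro prev letras
    rw [List.foldl_cons, ih]
    by_cases hs : PySem.Chars.isspace c
    · simp [hs, pvFirsts]
    · cases prev <;> simp [hs, pvFirsts]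

-- ===== VERDICT (by name: the statement is the Claim_ definition above) =====
theorem primera_letra_mayuscula_spec : Claim_equal_primera_letra_mayuscula := by
  intro cadena _
  show primera_letra_mayuscula cadena = primera_letra_mayuscula_alt cadena
  apply String.toList_inj.mp
  rw [pv_A_chars, pv_B_chars, pv_B_fold]
  simp
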